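-- pv_equiv track=rewrite | github.com/CaiserSz/orge1 | scripts/wifi_failover_monitor.py | get_next_wifi_network
-- ===== SOURCE A (Python) =====
-- from typing import Optional, List, Tuple
--
-- WIFI_NETWORKS = [
--     ("ORGE_ARGE", 10),
--     ("ORGE_DEPO", 9),
--     ("ORGE_EV", 8),
--     ("ERTAC", 7),
-- ]
--
-- def get_next_wifi_network(current_network: Optional[str]) -> Optional[str]:
--     """
--     Mevcut ağdan sonraki WiFi ağını döndürür
--
--     Args:
--         current_network: Şu anki ağ adı
--
--     Returns:
--         Sonraki ağ adı veya None
--     """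
--     if current_network is None:
--         # İlk ağa bağlan
--         return WIFI_NETWORKS[0][0]
--
--     # Mevcut ağın priority'sini bul
--     current_priority = None
--     for name, priority in WIFI_NETWORKS:
--         if name == current_network:
--             current_priority = priority
--             break
--
--     if current_priority is None:
--         # Mevcut ağ listede yok, ilk ağa dön
--         return WIFI_NETWORKS[0][0]
--
--     # Daha düşük priority'li ağı bul
--     for name, priority in WIFI_NETWORKS:
--         if priority < current_priority:
--             return name
--
--     # Tüm ağlar denendi, ilk ağa dön
--     return WIFI_NETWORKS[0][0]
-- ===== SOURCE B (Python) =====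
-- from typing import Optional
--
-- WIFI_NETWORKS = [
--     ("ORGE_ARGE", 10),
--     ("ORGE_DEPO", 9),
--     ("ORGE_EV", 8),
--     ("ERTAC", 7),
-- ]
--
-- NAMES = [n for n, _ in WIFI_NETWORKS]
--
-- def get_next_wifi_network(current_network: Optional[str]) -> Optional[str]:
--     """Positional successor in the fixed (descending-priority) name list."""
--     if current_network is None or current_network not in NAMES:
--         return NAMES[0]
--     i = NAMES.index(current_network)
--     return NAMES[i + 1] if i + 1 < len(NAMES) else NAMES[0]
-- ===== Notes on version B (the rewrite author's own statement) =====
-- stated objective: simpler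
-- what changed: Replaces A's two scans over (name, priority) pairs (priority lookup then priority-comparison scan) with purely positional successor logic on the ordered name list: index of current, then next index or wrap to first.
import Mathlib
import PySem

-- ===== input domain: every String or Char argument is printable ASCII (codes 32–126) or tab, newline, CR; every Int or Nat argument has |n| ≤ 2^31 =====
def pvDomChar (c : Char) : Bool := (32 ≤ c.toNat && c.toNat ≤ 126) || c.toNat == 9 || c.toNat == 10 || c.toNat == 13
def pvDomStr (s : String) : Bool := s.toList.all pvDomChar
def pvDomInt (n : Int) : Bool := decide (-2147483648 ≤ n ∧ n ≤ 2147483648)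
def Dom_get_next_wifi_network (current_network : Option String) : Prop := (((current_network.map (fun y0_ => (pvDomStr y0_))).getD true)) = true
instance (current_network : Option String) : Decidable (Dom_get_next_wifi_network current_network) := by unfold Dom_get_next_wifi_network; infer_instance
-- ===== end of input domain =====

-- B replaces A's priority-lookup + priority-comparison scans with positional successor logic on the name list (objective: simpler).

-- ===== PORT A =====
def pvWIFI_NETWORKS : List (String × Int) :=
  [("ORGE_ARGE", 10), ("ORGE_DEPO", 9), ("ORGE_EV", 8), ("ERTAC", 7)]

-- first loop: find priority of current_network (break at first match)
def pvFindPriority (cur : String) : List (String × Int) → Option Int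
  | [] => none
  | (name, priority) :: rest =>
      if name == cur then some priority else pvFindPriority cur rest

-- second loop: first name with strictly lower priority
def pvFindLower (cp : Int) : List (String × Int) → Option String
  | [] => none
  | (name, priority) :: rest =>
      if priority < cp then some name else pvFindLower cp rest

def get_next_wifi_network (current_network : Option String) : Option String :=
  match current_network with
  | none => some (pvWIFI_NETWORKS.headI.1)
  | some cur =>
    match pvFindPriority cur pvWIFI_NETWORKS with
    | none => some (pvWIFI_NETWORKS.headI.1)
    | some cp =>
      match pvFindLower cp pvWIFI_NETWORKS with
      | some name => some name
      | none => some (pvWIFI_NETWORKS.headI.1)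

-- ===== PORT B =====
def pvNAMES : List String := pvWIFI_NETWORKS.map Prod.fst

def get_next_wifi_network_alt (current_network : Option String) : Option String :=
  match current_network with
  | none => some (pvNAMES.headI)
  | some cur =>
    match PySem.List.index? pvNAMES cur with
    | none => some (pvNAMES.headI)
    | some i =>
      if i + 1 < pvNAMES.length then some (pvNAMES.getD (i + 1) "")
      else some (pvNAMES.headI)

-- ===== PRECONDITION & SPEC =====
def Spec_get_next_wifi_network (current_network : Option String) (out : Option String) : Prop := out = get_next_wifi_network_alt current_network
instance (current_network : Option String) (out : Option String) : Decidable (Spec_get_next_wifi_network current_network out) := by unfold Spec_get_next_wifi_network; infer_instance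

-- ===== CLAIM (what is proved, stated in full; the proofs are below) =====
def Claim_equal_get_next_wifi_network : Prop := ∀ (current_network : Option String), Dom_get_next_wifi_network current_network → Spec_get_next_wifi_network current_network (get_next_wifi_network current_network)

-- ===== LEMMAS AND PROOFS =====

-- ===== VERDICT (by name: the statement is the Claim_ definition above) =====
theorem get_next_wifi_network_spec : Claim_equal_get_next_wifi_network := by
  intro cur _
  unfold Spec_get_next_wifi_network
  cases cur with
  | none => rfl
  | some s =>
    simp only [get_next_wifi_network, get_next_wifi_network_alt, pvWIFI_NETWORKS, pvNAMES,
      pvFindPriority, pvFindLower, PySem.List.index?, List.map]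
    by_cases h1 : "ORGE_ARGE" = s <;> by_cases h2 : "ORGE_DEPO" = s <;>
      by_cases h3 : "ORGE_EV" = s <;> by_cases h4 : "ERTAC" = s <;>
      simp_all [List.idxOf?, List.findIdx?, List.findIdx?.go]
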